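-- pv_equiv track=rewrite | github.com/tabledevil/mailscan | Utils/ioc_extractor.py | defang_ioc_data
-- ===== SOURCE A (Python) =====
-- def defang_ioc_data(data: dict) -> dict:
--     """Return a copy of an IOC summary dict with all values defanged.
--
--     Applies common defanging transformations:
--     - ``http`` -> ``hxxp``
--     - ``.`` in IPs/domains -> ``[.]``
--     - ``@`` in emails -> ``[@]``
--     """
--     out: dict = {}
--     for key, values in data.items():
--         if not isinstance(values, list):
--             out[key] = values
--             continue
--         defanged = []
--         for v in values:
--             v = str(v)
--             if key in ("ipv4", "ipv6"):
--                 v = v.replace(".", "[.]")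
--             elif key == "domains":
--                 v = v.replace(".", "[.]")
--             elif key == "urls":
--                 v = v.replace("http://", "hxxp://").replace("https://", "hxxps://")
--                 v = v.replace("ftp://", "fxp://")
--             elif key == "emails":
--                 v = v.replace("@", "[@]")
--             defanged.append(v)
--         out[key] = defanged
--     return out
-- ===== SOURCE B (Python) =====
-- _RULES = [
--     (("ipv4", "ipv6", "domains"), ".", "[.]"),
--     (("urls",), "http://", "hxxp://"),
--     (("urls",), "https://", "hxxps://"),
--     (("urls",), "ftp://", "fxp://"),
--     (("emails",), "@", "[@]"),
-- ]
--
--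
-- def defang_ioc_data(data: dict) -> dict:
--     # Stage 1: copy everything through, stringifying list elements.
--     out = {
--         key: [str(v) for v in values] if isinstance(values, list) else values
--         for key, values in data.items()
--     }
--     # Stage 2: run each rewrite rule as its own pass over the affected entries.
--     for keys, old, new in _RULES:
--         for k in keys:
--             if isinstance(out.get(k), list):
--                 out[k] = [v.replace(old, new) for v in out[k]]
--     return out
-- ===== Notes on version B (the rewrite author's own statement) =====
-- stated objective: alternative
-- what changed: B first copies the whole dict through, then runs a sequence of independent rewrite passes (one per (key-set, old, new) rule) that mutate the affected entries in place, instead of A's single pass dispatching per key through an if/elif chain.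
import Mathlib
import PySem

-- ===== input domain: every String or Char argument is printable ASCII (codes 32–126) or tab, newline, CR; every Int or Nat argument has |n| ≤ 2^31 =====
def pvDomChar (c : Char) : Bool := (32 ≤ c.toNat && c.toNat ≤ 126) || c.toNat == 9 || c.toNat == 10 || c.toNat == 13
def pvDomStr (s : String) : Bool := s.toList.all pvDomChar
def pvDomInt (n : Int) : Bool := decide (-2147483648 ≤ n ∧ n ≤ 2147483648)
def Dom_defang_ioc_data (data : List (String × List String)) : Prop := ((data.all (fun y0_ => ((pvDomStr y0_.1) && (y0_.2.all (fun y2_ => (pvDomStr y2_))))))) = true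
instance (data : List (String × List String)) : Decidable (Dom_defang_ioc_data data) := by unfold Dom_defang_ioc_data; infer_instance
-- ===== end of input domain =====

-- B copies the dict through once and then runs a sequence of rewrite passes, one per
-- (key-set, old, new) rule, mutating the affected entries in place, instead of A's single
-- pass with a per-key if/elif branch (objective: alternative; same cost).

-- ===== PORT A =====
-- Literal port of A. The argument is a dict[str, list[str]], so 'not isinstance(values, list)'
-- is always false (the branch is ported away) and 'str(v)' is the identity on the str values.
-- A builds its output as a Python dict: ported with PySem.Dict, returning its items.
def defang_ioc_data (data : List (String × List String)) : List (String × List String) :=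
  (data.foldl
    (fun (out : PySem.Dict String (List String)) kv =>
      let key := kv.1
      let defanged := kv.2.foldl
        (fun acc v =>
          let v :=
            if key = "ipv4" ∨ key = "ipv6" then PySem.Str.replace v "." "[.]"
            else if key = "domains" then PySem.Str.replace v "." "[.]"
            else if key = "urls" then
              PySem.Str.replace
                (PySem.Str.replace (PySem.Str.replace v "http://" "hxxp://") "https://" "hxxps://")
                "ftp://" "fxp://"
            else if key = "emails" then PySem.Str.replace v "@" "[@]"
            else v
          acc ++ [v]) []
      out.insert key defanged)
    PySem.Dict.empty).items

-- ===== PORT B =====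
-- _RULES : the module-level rule list of Source B (tuples ported as List String × String × String)
def pvRules : List (List String × String × String) :=
  [ (["ipv4", "ipv6", "domains"], ".", "[.]"),
    (["urls"], "http://", "hxxp://"),
    (["urls"], "https://", "hxxps://"),
    (["urls"], "ftp://", "fxp://"),
    (["emails"], "@", "[@]") ]

-- one rule pass of Source B's stage 2: for each k in keys, if out.get(k) is a list (here: if the
-- key is present, since every value is a list) rewrite the entry in place
def pvRulePass (d : PySem.Dict String (List String)) (r : List String × String × String) :
    PySem.Dict String (List String) :=
  r.1.foldl
    (fun d k =>
      if d.contains k then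
        d.insert k ((d.getD k []).map (fun v => PySem.Str.replace v r.2.1 r.2.2))
      else d) d

-- stage 1 (the dict comprehension; 'str(v)' is the identity on str) then the rule passes
def defang_ioc_data_alt (data : List (String × List String)) : List (String × List String) :=
  (pvRules.foldl pvRulePass
    (data.foldl (fun (out : PySem.Dict String (List String)) kv =>
      out.insert kv.1 (kv.2.map (fun v => v))) PySem.Dict.empty)).items

-- ===== PRECONDITION & SPEC =====
-- The argument is a Python dict, whose keys are necessarily distinct; an assoc list with
-- duplicate keys represents no dict input, so Pre_ excludes exactly those (nothing A returns on is lost).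
def Pre_defang_ioc_data (data : List (String × List String)) : Prop :=
  (data.map Prod.fst).Nodup
instance (data : List (String × List String)) : Decidable (Pre_defang_ioc_data data) := by
  unfold Pre_defang_ioc_data; infer_instance

def pvWitness_defang_ioc_data : (List (String × List String)) :=
  [("ipv4", ["1.2.3.4"]), ("urls", ["http://a.b"]), ("other", ["x@y"])]

def Spec_defang_ioc_data (data : List (String × List String)) (out : List (String × List String)) : Prop := out = defang_ioc_data_alt data
instance (data : List (String × List String)) (out : List (String × List String)) : Decidable (Spec_defang_ioc_data data out) := by unfold Spec_defang_ioc_data; infer_instance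

-- ===== CLAIM =====
def Claim_equal_defang_ioc_data : Prop := ∀ (data : List (String × List String)), Dom_defang_ioc_data data → Pre_defang_ioc_data data → Spec_defang_ioc_data data (defang_ioc_data data)

-- ===== LEMMAS AND PROOFS =====

-- one step of a rule pass (one key k): on a nodup dict its items are rewritten pointwise at k
theorem pvStep_items (d : PySem.Dict String (List String)) (k : String) (f : String → String)
    (hnd : d.keys.Nodup) :
    (if d.contains k then d.insert k ((d.getD k []).map f) else d).items
      = d.items.map (fun p => if p.1 = k then (p.1, p.2.map f) else p) := by
  by_cases h : d.contains k = true
  · rw [if_pos h, PySem.Dict.items_insert_of_contains d _ h]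
    refine List.map_congr_left ?_
    intro p hp
    by_cases hpk : p.1 = k
    · have hmem : (k, p.2) ∈ d.items := by
        have := hp; rwa [show p = (k, p.2) from by cases p; simp_all] at this
      have : d.getD k [] = p.2 := PySem.Dict.getD_of_mem_items d hmem hnd []
      simp [hpk, this]
    · simp [hpk]
  · rw [if_neg h]
    have hnk : k ∉ d.keys := by
      intro hmem
      exact h ((PySem.Dict.contains_iff_mem_keys d k).mpr hmem)
    conv_lhs => rw [← List.map_id d.items]
    refine List.map_congr_left ?_
    intro p hp
    have : p.1 ≠ k := by
      intro hpk
      exact hnk (hpk ▸ PySem.Dict.mem_keys_of_mem_items d hp)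
    simp [this]

theorem pvStep_keys (d : PySem.Dict String (List String)) (k : String) (f : String → String) :
    (if d.contains k then d.insert k ((d.getD k []).map f) else d).keys = d.keys := by
  by_cases h : d.contains k = true
  · rw [if_pos h, PySem.Dict.keys_insert_of_contains d _ h]
  · rw [if_neg h]

-- a whole rule pass over a nodup key list: pointwise rewrite at every key of the list
theorem pvPass_items (ks : List String) (old new : String)
    (d : PySem.Dict String (List String)) (hnd : d.keys.Nodup) (hks : ks.Nodup) :
    (ks.foldl
      (fun d k =>
        if d.contains k then
          d.insert k ((d.getD k []).map (fun v => PySem.Str.replace v old new))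
        else d) d).items
      = d.items.map (fun p => if p.1 ∈ ks then (p.1, p.2.map (fun v => PySem.Str.replace v old new)) else p) := by
  induction ks generalizing d with
  | nil => simp
  | cons k rest ih =>
    simp only [List.nodup_cons] at hks
    rw [List.foldl_cons]
    have hkeys := pvStep_keys d k (fun v => PySem.Str.replace v old new)
    rw [ih _ (by rw [hkeys]; exact hnd) hks.2,
        pvStep_items d k (fun v => PySem.Str.replace v old new) hnd, List.map_map]
    refine List.map_congr_left ?_
    intro p _
    by_cases hpk : p.1 = k
    · simp [hpk, Function.comp, hks.1]
    · by_cases hpr : p.1 ∈ rest <;> simp [hpk, hpr, Function.comp]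

theorem pvPass_keys (ks : List String) (old new : String)
    (d : PySem.Dict String (List String)) :
    (ks.foldl
      (fun d k =>
        if d.contains k then
          d.insert k ((d.getD k []).map (fun v => PySem.Str.replace v old new))
        else d) d).keys = d.keys := by
  induction ks generalizing d with
  | nil => rfl
  | cons k rest ih => rw [List.foldl_cons, ih, pvStep_keys]

-- ===== VERDICT =====
theorem defang_ioc_data_spec : Claim_equal_defang_ioc_data := by
  intro data _ hpre
  unfold Spec_defang_ioc_data defang_ioc_data defang_ioc_data_alt
  -- A's side: fresh-key insert loop appends; inner fold is a map
  have hA : (List.foldl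
      (fun (out : PySem.Dict String (List String)) kv =>
        out.insert kv.1 (List.foldl (fun acc v => acc ++
          [if kv.1 = "ipv4" ∨ kv.1 = "ipv6" then PySem.Str.replace v "." "[.]"
           else if kv.1 = "domains" then PySem.Str.replace v "." "[.]"
           else if kv.1 = "urls" then
             PySem.Str.replace
               (PySem.Str.replace (PySem.Str.replace v "http://" "hxxp://") "https://" "hxxps://")
               "ftp://" "fxp://"
           else if kv.1 = "emails" then PySem.Str.replace v "@" "[@]"
           else v]) [] kv.2)) PySem.Dict.empty data).items
      = data.map (fun kv => (kv.1, kv.2.map (fun v =>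
          if kv.1 = "ipv4" ∨ kv.1 = "ipv6" then PySem.Str.replace v "." "[.]"
          else if kv.1 = "domains" then PySem.Str.replace v "." "[.]"
          else if kv.1 = "urls" then
            PySem.Str.replace
              (PySem.Str.replace (PySem.Str.replace v "http://" "hxxp://") "https://" "hxxps://")
              "ftp://" "fxp://"
          else if kv.1 = "emails" then PySem.Str.replace v "@" "[@]"
          else v))) := by
    rw [PySem.Dict.items_foldl_insert_fresh data Prod.fst _ PySem.Dict.empty
      (fun a _ => by simp) hpre]
    simp only [PySem.List.foldl_append_singleton_eq_map, List.nil_append]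
    rfl
  -- B's side stage 1
  have hB0 : (List.foldl (fun (out : PySem.Dict String (List String)) kv =>
      out.insert kv.1 (kv.2.map (fun v => v))) PySem.Dict.empty data).items
      = data.map (fun kv => (kv.1, kv.2.map (fun v => v))) := by
    rw [PySem.Dict.items_foldl_insert_fresh data Prod.fst
      (fun kv => kv.2.map (fun v => v)) PySem.Dict.empty (fun a _ => by simp) hpre]
    rfl
  have hB0k : (List.foldl (fun (out : PySem.Dict String (List String)) kv =>
      out.insert kv.1 (kv.2.map (fun v => v))) PySem.Dict.empty data).keys.Nodup :=
    PySem.Dict.nodup_keys_foldl_insert_key data Prod.fst _ _ (by simp [PySem.Dict.keys_empty])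
  set d0 := List.foldl (fun (out : PySem.Dict String (List String)) kv =>
      out.insert kv.1 (kv.2.map (fun v => v))) PySem.Dict.empty data with hd0
  have h1k : (pvRulePass d0 (["ipv4", "ipv6", "domains"], ".", "[.]")).keys = d0.keys :=
    pvPass_keys _ _ _ _
  have h2k := pvPass_keys ["urls"] "http://" "hxxp://"
    (pvRulePass d0 (["ipv4", "ipv6", "domains"], ".", "[.]"))
  have h3k := pvPass_keys ["urls"] "https://" "hxxps://"
    (pvRulePass (pvRulePass d0 (["ipv4", "ipv6", "domains"], ".", "[.]"))
      (["urls"], "http://", "hxxp://"))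
  have h4k := pvPass_keys ["urls"] "ftp://" "fxp://"
    (pvRulePass (pvRulePass (pvRulePass d0 (["ipv4", "ipv6", "domains"], ".", "[.]"))
      (["urls"], "http://", "hxxp://")) (["urls"], "https://", "hxxps://"))
  simp only [pvRules, List.foldl_cons, List.foldl_nil]
  simp only [pvRulePass] at h1k h2k h3k h4k ⊢
  rw [pvPass_items _ _ _ _ (by rw [h4k, h3k, h2k, h1k]; exact hB0k) (by decide),
      pvPass_items _ _ _ _ (by rw [h3k, h2k, h1k]; exact hB0k) (by decide),
      pvPass_items _ _ _ _ (by rw [h2k, h1k]; exact hB0k) (by decide),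
      pvPass_items _ _ _ _ (by rw [h1k]; exact hB0k) (by decide),
      pvPass_items _ _ _ _ hB0k (by decide), hB0, hA]
  simp only [List.map_map]
  refine List.map_congr_left ?_
  intro kv _
  simp only [Function.comp]
  by_cases h1 : kv.1 = "ipv4"
  · simp [h1]
  by_cases h2 : kv.1 = "ipv6"
  · simp [h2]
  by_cases h3 : kv.1 = "domains"
  · simp [h3]
  by_cases h4 : kv.1 = "urls"
  · simp [h4, List.map_map, Function.comp]
  by_cases h5 : kv.1 = "emails"
  · simp [h5]
  simp [h1, h2, h3, h4, h5]
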